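-- pv_equiv track=rewrite | github.com/TobiasKoopmann/cobert | model/dataset.py | _get_last_paper_index
-- ===== SOURCE A (Python) =====
-- def _get_last_paper_index(paper_ids):
--     """
--     Retrieve the index of the first maximum position id in the sequence (e.g. used for validation/testing)
--     @param position_ids: List of position ids
--     @return: int index of the first maximum position id
--     """
--     index = len(paper_ids)
--     for paper_id in reversed(paper_ids):
--         if paper_id != paper_ids[-1]:
--             break
--         index -= 1
--     else:
--         return len(paper_ids) - 1
--     return index
-- ===== SOURCE B (Python) =====
-- def _get_last_paper_index(paper_ids):
--     last = paper_ids[-1] if paper_ids else None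
--     boundary = -1
--     for i, pid in enumerate(paper_ids):
--         if pid != last:
--             boundary = i
--     return len(paper_ids) - 1 if boundary == -1 else boundary + 1
-- ===== Notes on version B (the rewrite author's own statement) =====
-- stated objective: alternative
-- what changed: Replaces A's backward early-stopping scan with break/for-else by a forward full pass that records the last index differing from the final element and derives the answer arithmetically (boundary+1, or len-1 if none).
import Mathlib
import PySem

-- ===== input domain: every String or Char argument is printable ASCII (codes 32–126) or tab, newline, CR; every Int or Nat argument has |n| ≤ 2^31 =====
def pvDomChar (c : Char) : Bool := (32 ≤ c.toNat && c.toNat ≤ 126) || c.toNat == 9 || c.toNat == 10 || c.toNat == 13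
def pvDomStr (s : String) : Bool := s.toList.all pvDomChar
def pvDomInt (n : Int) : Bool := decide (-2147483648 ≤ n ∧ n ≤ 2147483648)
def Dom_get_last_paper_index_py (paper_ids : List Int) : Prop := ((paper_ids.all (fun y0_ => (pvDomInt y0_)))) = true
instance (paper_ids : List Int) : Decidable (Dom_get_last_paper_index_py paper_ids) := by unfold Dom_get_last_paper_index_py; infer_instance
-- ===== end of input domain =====

-- B: forward full pass recording the last index that differs from the final element,
-- instead of A's backward early-stopping scan; same O(n) cost, different decomposition.
-- ===== PORT A =====
-- A's for-loop over reversed(paper_ids) with break/for-else; paper_ids[-1] is only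
-- evaluated inside the loop, where the list is nonempty, so getLast?.getD 0 is exact.
def pvALoop (paper_ids : List Int) : List Int → Int → Int
  | [], _ => (paper_ids.length : Int) - 1          -- for-else: return len(paper_ids) - 1
  | paper_id :: rest, index =>
      if paper_id ≠ paper_ids.getLast?.getD 0 then index    -- break: return index
      else pvALoop paper_ids rest (index - 1)

def get_last_paper_index_py (paper_ids : List Int) : Int :=
  pvALoop paper_ids paper_ids.reverse (paper_ids.length : Int)

-- ===== PORT B =====
def get_last_paper_index_py_alt (paper_ids : List Int) : Int :=
  let last : Option Int := paper_ids.getLast?     -- paper_ids[-1] if paper_ids else None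
  let boundary : Int :=
    (PySem.List.enumerate paper_ids).foldl
      (fun b p => if some p.2 ≠ last then p.1 else b) (-1)
  if boundary = -1 then (paper_ids.length : Int) - 1 else boundary + 1

-- ===== PRECONDITION & SPEC =====
def Spec_get_last_paper_index_py (paper_ids : List Int) (out : Int) : Prop := out = get_last_paper_index_py_alt paper_ids
instance (paper_ids : List Int) (out : Int) : Decidable (Spec_get_last_paper_index_py paper_ids out) := by unfold Spec_get_last_paper_index_py; infer_instance

-- ===== CLAIM (what is proved, stated in full; the proofs are below) =====
def Claim_equal_get_last_paper_index_py : Prop := ∀ (paper_ids : List Int), Dom_get_last_paper_index_py paper_ids → Spec_get_last_paper_index_py paper_ids (get_last_paper_index_py paper_ids)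

-- ===== LEMMAS AND PROOFS =====

-- ===== VERDICT (by name: the statement is the Claim_ definition above) =====
-- closed form for A's loop on a suffix r of the reversed list
theorem pvALoop_eq (pids : List Int) (l : Int) (hl : pids.getLast?.getD 0 = l) :
    ∀ (r : List Int) (n : Int), pvALoop pids r n =
      if r.all (· == l) then (pids.length : Int) - 1
      else n - ((r.takeWhile (· == l)).length : Int) := by
  intro r
  induction r with
  | nil => intro n; simp [pvALoop]
  | cons a t ih =>
      intro n
      by_cases ha : a = l
      · simp [pvALoop, hl, ha, ih]
        split_ifs with h
        · rfl
        · ring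
      · simp [pvALoop, hl, ha]

-- closed form for B's fold, driven from the back of the list
theorem pvBnd_eq (lo : Option Int) :
    ∀ (r : List Int),
      (PySem.List.enumerate r.reverse).foldl
          (fun b p => if some p.2 ≠ lo then p.1 else b) (-1) =
      if r.all (fun x => some x == lo) then -1
      else (r.length : Int) - 1 - ((r.takeWhile (fun x => some x == lo)).length : Int) := by
  intro r
  induction r with
  | nil => simp
  | cons a t ih =>
      have hrev : (a :: t).reverse = t.reverse ++ [a] := by simp
      rw [hrev, PySem.List.enumerate_append, List.foldl_append, ih,
          PySem.List.enumerate_cons, PySem.List.enumerate_nil, List.foldl_cons, List.foldl_nil]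
      by_cases ha : some a = lo
      · rw [if_neg (by simp [ha])]
        by_cases hall : t.all (fun x => some x == lo)
        · rw [if_pos hall, if_pos (by simp [List.all_cons, ha, hall])]
        · rw [if_neg hall, if_neg (by simp [List.all_cons, hall]),
              List.takeWhile_cons, if_pos (by simp [ha])]
          simp only [List.length_cons]
          push_cast; ring
      · rw [if_pos (by simp [ha]), if_neg (by simp [List.all_cons, ha]),
            List.takeWhile_cons, if_neg (by simp [ha])]
        simp only [List.length_reverse, List.length_cons, List.length_nil]
        push_cast; ring

theorem takeWhile_lt {p : Int → Bool} {r : List Int} (h : r.all p = false) :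
    (r.takeWhile p).length < r.length := by
  induction r with
  | nil => simp at h
  | cons a t ih =>
      by_cases ha : p a
      · rw [List.all_cons, ha, Bool.true_and] at h
        simp only [List.takeWhile_cons, ha, if_true, List.length_cons]
        exact Nat.succ_lt_succ (ih h)
      · simp [ha]

theorem all_congr' {p q : Int → Bool} (h : ∀ x, p x = q x) (r : List Int) :
    r.all p = r.all q := by
  induction r with
  | nil => rfl
  | cons a t ih => simp [h a, ih]

theorem takeWhile_congr' {p q : Int → Bool} (h : ∀ x, p x = q x) (r : List Int) :
    r.takeWhile p = r.takeWhile q := by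
  induction r with
  | nil => rfl
  | cons a t ih => simp only [List.takeWhile_cons, h a, ih]

-- ===== VERDICT (by name: the statement is the Claim_ definition above) =====
theorem get_last_paper_index_py_spec : Claim_equal_get_last_paper_index_py := by
  unfold Claim_equal_get_last_paper_index_py
  intro pids _
  unfold Spec_get_last_paper_index_py get_last_paper_index_py get_last_paper_index_py_alt
  cases hpe : pids with
  | nil => simp [pvALoop, PySem.List.enumerate]
  | cons a t =>
      have hne : pids ≠ [] := by simp [hpe]
      obtain ⟨l, hl⟩ : ∃ l, pids.getLast? = some l :=
        ⟨pids.getLast hne, List.getLast?_eq_getLast hne⟩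
      rw [← hpe]
      have hcong : ∀ x : Int, (some x == pids.getLast?) = (x == l) := by
        intro x; rw [hl]; by_cases h : x = l <;> simp [h]
      have hA := pvALoop_eq pids l (by rw [hl]; rfl) pids.reverse (pids.length : Int)
      have hallc : (pids.reverse.all (· == l)) = (pids.all (fun x => some x == pids.getLast?)) := by
        rw [List.all_reverse]; exact all_congr' (fun x => (hcong x).symm) pids
      have hB := pvBnd_eq pids.getLast? pids.reverse
      simp only [List.reverse_reverse] at hB
      have htwc : pids.reverse.takeWhile (· == l)
          = pids.reverse.takeWhile (fun x => some x == pids.getLast?) :=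
        takeWhile_congr' (fun x => (hcong x).symm) pids.reverse
      rw [hA, htwc, hallc]
      simp only [hB]
      by_cases hall : pids.all (fun x => some x == pids.getLast?)
      · simp [hall, List.all_reverse]
      · have hall' : pids.reverse.all (fun x => some x == pids.getLast?) = false := by
          rw [List.all_reverse]; simpa using hall
        have hlt := takeWhile_lt hall'
        simp only [List.length_reverse] at hlt
        have hne1 : ¬ ((pids.length : Int) - 1 - ((pids.reverse.takeWhile (fun x => some x == pids.getLast?)).length : Int) = -1) := by
          omega
        simp only [hall', Bool.false_eq_true, if_false, List.length_reverse]
        rw [if_neg hne1, if_neg hall]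
        ring
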